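-- pv_equiv track=rewrite | github.com/Kwyvo/Tetris | simulation/simulation_position.py | compter_lignes_probable
-- ===== SOURCE A (Python) =====
-- def compter_lignes_probable(plateau,coord_piece_suggerees):
--
--     nb_lignes_creee= 0
--     for coord in coord_piece_suggerees:
--         p1= coord[0]
--         c=0
--         for i in range(len(plateau)):
--             if i == p1:
--                 for j in range(len(plateau[0])):
--                     if plateau[i][j] in {1,2}:
--                         c+=1
--                 if c == j+1:
--                     nb_lignes_creee +=1
--     return nb_lignes_creee
-- ===== SOURCE B (Python) =====
-- def compter_lignes_probable(plateau, coord_piece_suggerees):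
--     width = len(plateau[0]) if plateau else 0
--     complete = {i for i, row in enumerate(plateau)
--                 if sum(1 for x in row if x in (1, 2)) == width}
--     return sum(1 for coord in coord_piece_suggerees if coord[0] in complete)
-- ===== Notes on version B (the rewrite author's own statement) =====
-- stated objective: alternative
-- what changed: Instead of re-scanning the whole board row-index loop for every suggested coordinate, B scans the board once to build the set of complete row indices and then counts suggested coordinates by set membership; this trades a per-coordinate board scan for one prescan, so it is not uniformly faster (a large board with few suggestions favours A).
-- outside the precondition, e.g. on compter_lignes_probable([[1], [2, 2]], [[1]]): A returns 1, B returns 0; on compter_lignes_probable([[]], [[1]]): A returns 0, B returns 0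
import Mathlib
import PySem

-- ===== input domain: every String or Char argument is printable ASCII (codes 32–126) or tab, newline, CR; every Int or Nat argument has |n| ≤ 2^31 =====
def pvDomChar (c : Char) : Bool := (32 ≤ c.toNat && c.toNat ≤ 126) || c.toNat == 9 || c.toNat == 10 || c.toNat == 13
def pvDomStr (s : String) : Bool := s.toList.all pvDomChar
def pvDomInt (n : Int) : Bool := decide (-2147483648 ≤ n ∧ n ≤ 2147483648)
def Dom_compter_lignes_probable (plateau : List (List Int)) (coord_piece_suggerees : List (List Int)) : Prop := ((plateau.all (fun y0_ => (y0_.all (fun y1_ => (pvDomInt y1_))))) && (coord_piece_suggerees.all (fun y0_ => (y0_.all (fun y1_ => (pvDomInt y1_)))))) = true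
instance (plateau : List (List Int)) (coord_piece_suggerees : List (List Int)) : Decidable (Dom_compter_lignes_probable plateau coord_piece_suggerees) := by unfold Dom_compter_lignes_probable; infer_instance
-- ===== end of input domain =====

-- B builds the set of complete row indices in one pass over the board and then counts
-- suggested coordinates by set membership, instead of A's per-coordinate rescan of the
-- whole board's row indices (a different decomposition, not uniformly faster).

-- ===== PORT A =====
-- State of A's i-loop: (c, nb_lignes_creee).  Under Pre_, the width w = len(plateau[0]) is
-- positive whenever the i-loop runs, so A's post-loop 'j + 1' equals w; we write w directly.
def compter_lignes_probable (plateau : List (List Int)) (coord_piece_suggerees : List (List Int)) : Int :=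
  coord_piece_suggerees.foldl (fun nb coord =>
    let p1 : Int := PySem.List.pyGetD coord 0 0   -- coord[0]; coord ≠ [] under Pre_
    let st := (PySem.List.pyRange 0 plateau.length 1).foldl (fun st i =>
      if i = p1 then
        let c := (PySem.List.pyRange 0 ((plateau.headD []).length : Int) 1).foldl
          (fun c j =>
            if PySem.List.pyGetD (PySem.List.pyGetD plateau i []) j 0 = 1 ∨
               PySem.List.pyGetD (PySem.List.pyGetD plateau i []) j 0 = 2
            then c + 1 else c) st.1
        (c, if c = ((plateau.headD []).length : Int) then st.2 + 1 else st.2)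
      else st) ((0 : Int), nb)
    st.2) 0

-- ===== PORT B =====
def compter_lignes_probable_alt (plateau : List (List Int)) (coord_piece_suggerees : List (List Int)) : Int :=
  let width : Int := if plateau = [] then 0 else ((plateau.headD []).length : Int)
  let complete : PySem.Set Int := PySem.Set.ofList
    ((PySem.List.enumerate plateau).filterMap (fun p =>
      if ((p.2.countP (fun x => x == 1 || x == 2) : Int)) = width then some p.1 else none))
  (coord_piece_suggerees.countP (fun coord =>
    PySem.Set.contains complete (PySem.List.pyGetD coord 0 0)) : Int)

-- ===== PRECONDITION & SPEC =====
-- Pre_ excludes inputs where A raises (an empty suggested coordinate: IndexError on coord[0];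
-- a non-empty board with an empty first row: UnboundLocalError on 'j' when a coordinate
-- matches a row) and ragged boards, where A's comparison of a row against row 0's width is an
-- accident of its implementation (IndexError when row i is shorter than row 0).
def Pre_compter_lignes_probable (plateau : List (List Int)) (coord_piece_suggerees : List (List Int)) : Prop :=
  (∀ c ∈ coord_piece_suggerees, c ≠ []) ∧
  (plateau = [] ∨
    (0 < (plateau.headD []).length ∧
     ∀ row ∈ plateau, row.length = (plateau.headD []).length))
instance (plateau : List (List Int)) (coord_piece_suggerees : List (List Int)) : Decidable (Pre_compter_lignes_probable plateau coord_piece_suggerees) := by unfold Pre_compter_lignes_probable; infer_instance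

def pvWitness_compter_lignes_probable : List (List Int) × List (List Int) :=
  ([[1, 2], [0, 1]], [[0, 3], [1]])

def Spec_compter_lignes_probable (plateau : List (List Int)) (coord_piece_suggerees : List (List Int)) (out : Int) : Prop := out = compter_lignes_probable_alt plateau coord_piece_suggerees
instance (plateau : List (List Int)) (coord_piece_suggerees : List (List Int)) (out : Int) : Decidable (Spec_compter_lignes_probable plateau coord_piece_suggerees out) := by unfold Spec_compter_lignes_probable; infer_instance

-- ===== CLAIM (what is proved, stated in full; the proofs are below) =====
def Claim_equal_compter_lignes_probable : Prop := ∀ (plateau : List (List Int)) (coord_piece_suggerees : List (List Int)), Dom_compter_lignes_probable plateau coord_piece_suggerees → Pre_compter_lignes_probable plateau coord_piece_suggerees → Spec_compter_lignes_probable plateau coord_piece_suggerees (compter_lignes_probable plateau coord_piece_suggerees)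

-- ===== LEMMAS AND PROOFS =====

-- proof-only: A's i-loop body, as a named function (definitionally equal to the lambda in the port)
def pvStep (plateau : List (List Int)) (p1 : Int) (st : Int × Int) (i : Int) : Int × Int :=
  if i = p1 then
    let c := (PySem.List.pyRange 0 ((plateau.headD []).length : Int) 1).foldl
      (fun c j =>
        if PySem.List.pyGetD (PySem.List.pyGetD plateau i []) j 0 = 1 ∨
           PySem.List.pyGetD (PySem.List.pyGetD plateau i []) j 0 = 2
        then c + 1 else c) st.1
    (c, if c = ((plateau.headD []).length : Int) then st.2 + 1 else st.2)
  else st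

-- proof-only: B's complete-row index list (before dedup)
def pvComplete (plateau : List (List Int)) : List Int :=
  (PySem.List.enumerate plateau).filterMap (fun p =>
    if ((p.2.countP (fun x => x == 1 || x == 2) : Int))
        = (if plateau = [] then 0 else ((plateau.headD []).length : Int))
    then some p.1 else none)

theorem pv_skip (plateau : List (List Int)) (p1 : Int) (l : List Int) (st : Int × Int)
    (h : ∀ i ∈ l, i ≠ p1) : l.foldl (pvStep plateau p1) st = st := by
  induction l generalizing st with
  | nil => rfl
  | cons a l ih =>
    rw [List.foldl_cons]
    have ha : a ≠ p1 := h a (List.mem_cons_self)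
    rw [show pvStep plateau p1 st a = st by simp [pvStep, ha]]
    exact ih st (fun i hi => h i (List.mem_cons_of_mem _ hi))

theorem pv_mem_complete (plateau : List (List Int)) (x : Int) :
    x ∈ pvComplete plateau ↔ ∃ (k : Nat) (h : k < plateau.length), x = (k : Int) ∧
      ((plateau[k].countP (fun v => v == 1 || v == 2) : Int))
        = (if plateau = [] then 0 else ((plateau.headD []).length : Int)) := by
  rcases eq_or_ne plateau [] with rfl | hne
  · simp [pvComplete]
  · simp only [pvComplete, List.mem_filterMap, PySem.List.mem_enumerate_iff, if_neg hne]
    constructor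
    · rintro ⟨p, ⟨k, hk, rfl⟩, hp⟩
      split at hp
      next hc =>
        have hx := Option.some.inj hp
        exact ⟨k, hk, by omega, by simpa using hc⟩
      next => simp at hp
    · rintro ⟨k, hk, rfl, hc⟩
      exact ⟨((0 : Int) + (k : Int), plateau[k]), ⟨k, hk, rfl⟩, by simp [hc]⟩

theorem pv_row_count (plateau : List (List Int)) (k : Nat) (hk : k < plateau.length)
    (hrect : ∀ row ∈ plateau, row.length = (plateau.headD []).length) (init : Int) :
    (PySem.List.pyRange 0 ((plateau.headD []).length : Int) 1).foldl
      (fun c j =>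
        if PySem.List.pyGetD (PySem.List.pyGetD plateau (k : Int) []) j 0 = 1 ∨
           PySem.List.pyGetD (PySem.List.pyGetD plateau (k : Int) []) j 0 = 2
        then c + 1 else c) init
    = init + (plateau[k].countP (fun v => v == 1 || v == 2) : Int) := by
  have hrow : PySem.List.pyGetD plateau (k : Int) [] = plateau[k] := by
    simp [PySem.List.pyGetD_natCast, hk]
  have hlen : (plateau.headD []).length = plateau[k].length :=
    (hrect plateau[k] (List.getElem_mem hk)).symm
  rw [hrow, hlen]
  rw [PySem.List.foldl_pyRange_zero_pyGetD' plateau[k] 0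
        (fun c x => if x = 1 ∨ x = 2 then c + 1 else c) init]
  rw [PySem.List.foldl_ite_add_one]
  congr 2
  apply List.countP_congr
  intro v _
  simp

theorem pv_loop (plateau : List (List Int)) (p1 nb : Int)
    (hrect : ∀ row ∈ plateau, row.length = (plateau.headD []).length) :
    ((PySem.List.pyRange 0 (plateau.length : Int) 1).foldl (pvStep plateau p1) ((0 : Int), nb)).2
      = nb + (if p1 ∈ pvComplete plateau then 1 else 0) := by
  by_cases hmem : 0 ≤ p1 ∧ p1 < (plateau.length : Int)
  · obtain ⟨h0, hlt⟩ := hmem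
    obtain ⟨k, hk, rfl⟩ : ∃ (k : Nat), k < plateau.length ∧ p1 = (k : Int) :=
      ⟨p1.toNat, by omega, by omega⟩
    have hne : plateau ≠ [] := by intro h; subst h; simp at hk
    have hsplit1 := PySem.List.pyRange_one_append 0 (k : Int) (plateau.length : Int)
      (by omega) (by omega)
    have hsplit2 := PySem.List.pyRange_one_append (k : Int) ((k : Int) + 1) (plateau.length : Int)
      (by omega) (by omega)
    rw [hsplit1, hsplit2, PySem.List.pyRange_one_singleton, List.foldl_append, List.foldl_append]
    rw [pv_skip plateau (k : Int) (PySem.List.pyRange 0 (k : Int) 1) ((0 : Int), nb)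
      (fun i hi => by have := PySem.List.mem_pyRange_one.mp hi; omega)]
    rw [List.foldl_cons, List.foldl_nil]
    rw [show pvStep plateau (k : Int) ((0 : Int), nb) (k : Int)
        = (((plateau[k].countP (fun v => v == 1 || v == 2) : Int)),
           if ((plateau[k].countP (fun v => v == 1 || v == 2) : Int))
              = ((plateau.headD []).length : Int) then nb + 1 else nb) by
      simp only [pvStep, if_true]
      rw [pv_row_count plateau k hk hrect 0, zero_add]]
    rw [pv_skip plateau (k : Int) (PySem.List.pyRange ((k : Int) + 1) (plateau.length : Int) 1) _
      (fun i hi => by have := PySem.List.mem_pyRange_one.mp hi; omega)]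
    simp only [pv_mem_complete, if_neg hne]
    by_cases hc : ((plateau[k].countP (fun v => v == 1 || v == 2) : Int))
        = ((plateau.headD []).length : Int)
    · rw [if_pos hc, if_pos ⟨k, hk, rfl, hc⟩]
    · rw [if_neg hc, if_neg (by
        rintro ⟨k', hk', hkk, hc'⟩
        have : k' = k := by omega
        subst this; exact hc hc')]
      simp
  · rw [pv_skip plateau p1 (PySem.List.pyRange 0 (plateau.length : Int) 1) ((0 : Int), nb)
      (fun i hi => by have := PySem.List.mem_pyRange_one.mp hi; omega)]
    rw [if_neg (by
      rw [pv_mem_complete]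
      rintro ⟨k, hk, rfl, -⟩
      exact hmem ⟨by omega, by omega⟩)]
    simp

theorem pv_outer (plateau : List (List Int)) (coords : List (List Int)) (nb : Int)
    (hrect : ∀ row ∈ plateau, row.length = (plateau.headD []).length) :
    coords.foldl (fun nb coord =>
      ((PySem.List.pyRange 0 (plateau.length : Int) 1).foldl
        (pvStep plateau (PySem.List.pyGetD coord 0 0)) ((0 : Int), nb)).2) nb
    = nb + (coords.countP (fun coord =>
        (pvComplete plateau).contains (PySem.List.pyGetD coord 0 0)) : Int) := by
  induction coords generalizing nb with
  | nil => simp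
  | cons c cs ih =>
    rw [List.foldl_cons, ih, pv_loop plateau _ nb hrect, List.countP_cons]
    by_cases hm : PySem.List.pyGetD c 0 0 ∈ pvComplete plateau
    · have hb : (pvComplete plateau).contains (PySem.List.pyGetD c 0 0) = true := by
        simpa using hm
      rw [if_pos hm, hb]
      simp only [if_true]
      push_cast
      ring
    · have hb : (pvComplete plateau).contains (PySem.List.pyGetD c 0 0) = false := by
        simpa using hm
      rw [if_neg hm, hb]
      simp

-- ===== VERDICT (by name: the statement is the Claim_ definition above) =====
theorem compter_lignes_probable_spec : Claim_equal_compter_lignes_probable := by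
  intro plateau coords _hdom hpre
  obtain ⟨-, hplat⟩ := hpre
  have hrect : ∀ row ∈ plateau, row.length = (plateau.headD []).length := by
    rcases hplat with h | ⟨-, h2⟩
    · subst h; intro row hr; simp at hr
    · exact h2
  show compter_lignes_probable plateau coords = compter_lignes_probable_alt plateau coords
  have hA : compter_lignes_probable plateau coords
      = coords.foldl (fun nb coord =>
          ((PySem.List.pyRange 0 (plateau.length : Int) 1).foldl
            (pvStep plateau (PySem.List.pyGetD coord 0 0)) ((0 : Int), nb)).2) 0 := rfl
  have hB : compter_lignes_probable_alt plateau coords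
      = (coords.countP (fun coord =>
          PySem.Set.contains (PySem.Set.ofList (pvComplete plateau))
            (PySem.List.pyGetD coord 0 0)) : Int) := rfl
  rw [hA, hB, pv_outer plateau coords 0 hrect, zero_add]
  congr 1
  apply List.countP_congr
  intro c _
  constructor
  · intro h
    have hm : PySem.List.pyGetD c 0 0 ∈ pvComplete plateau := by simpa using h
    have : PySem.List.pyGetD c 0 0 ∈ PySem.Set.ofList (pvComplete plateau) :=
      (PySem.Set.mem_ofList _ _).mpr hm
    simpa [PySem.Set.contains_eq_listContains] using this
  · intro h
    have : PySem.List.pyGetD c 0 0 ∈ PySem.Set.ofList (pvComplete plateau) := by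
      simpa [PySem.Set.contains_eq_listContains] using h
    simpa using (PySem.Set.mem_ofList _ _).mp this
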